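-- pv_equiv track=rewrite | github.com/Shajiu/AlgorithmBook | CS-Notes/Perfect Squares.py | generateSquares
-- ===== SOURCE A (Python) =====
-- def generateSquares(n):
--     squares=[]
--     square=1
--     diff=3
--     while square<=n:
--         squares.append(square)
--         square+=diff
--         diff+=2
--     return squares
-- ===== SOURCE B (Python) =====
-- def generateSquares(n):
--     if n < 1:
--         return []
--     # binary search for the largest k with k*k <= n
--     lo, hi = 1, n
--     while lo < hi:
--         mid = (lo + hi + 1) // 2
--         if mid * mid <= n:
--             lo = mid
--         else:
--             hi = mid - 1
--     return [i * i for i in range(1, lo + 1)]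
-- ===== Notes on version B (the rewrite author's own statement) =====
-- stated objective: alternative
-- what changed: B first finds the largest k with k*k <= n by binary search (no running-square accumulators), then materialises the answer in one shot as a comprehension of i*i over range(1, k+1).
import Mathlib
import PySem

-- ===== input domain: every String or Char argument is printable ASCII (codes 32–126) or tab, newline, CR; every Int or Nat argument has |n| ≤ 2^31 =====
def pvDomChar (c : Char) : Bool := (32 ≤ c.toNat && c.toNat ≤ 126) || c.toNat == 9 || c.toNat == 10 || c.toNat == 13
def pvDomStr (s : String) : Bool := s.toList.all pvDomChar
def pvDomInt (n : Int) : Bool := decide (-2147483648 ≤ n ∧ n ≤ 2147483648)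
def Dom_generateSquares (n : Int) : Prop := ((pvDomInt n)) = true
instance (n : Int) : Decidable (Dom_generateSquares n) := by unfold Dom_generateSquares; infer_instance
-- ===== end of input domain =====

-- B finds the largest k with k*k ≤ n by binary search, then builds [i*i for i in range(1,k+1)] (alternative decomposition).


-- ===== PORT A =====
-- while square<=n: append square; square+=diff; diff+=2
def goA (n square diff : Int) (hd : 0 < diff) : List Int :=
  if h : square ≤ n then
    square :: goA n (square + diff) (diff + 2) (by omega)
  else []
termination_by (n + 1 - square).toNat
decreasing_by omega

def generateSquares (n : Int) : List Int := goA n 1 3 (by omega)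

-- ===== PORT B =====
-- midpoint bounds, needed by bsearch for its recursive-call proofs/termination
theorem pv_mid_bounds (lo hi : Int) (hlt : lo < hi) :
    lo < PySem.Int.floordiv (lo + hi + 1) 2 ∧ PySem.Int.floordiv (lo + hi + 1) 2 ≤ hi := by
  have he := PySem.Int.floordiv_eq_ediv_of_pos (a := lo + hi + 1) (b := 2) (by omega)
  rw [he]; omega

-- while lo < hi: mid = (lo+hi+1)//2; if mid*mid <= n: lo = mid else: hi = mid-1
def bsearch (n lo hi : Int) (h : lo ≤ hi) : Int :=
  if hlt : lo < hi then
    if PySem.Int.floordiv (lo + hi + 1) 2 * PySem.Int.floordiv (lo + hi + 1) 2 ≤ n then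
      bsearch n (PySem.Int.floordiv (lo + hi + 1) 2) hi (pv_mid_bounds lo hi hlt).2
    else
      bsearch n lo (PySem.Int.floordiv (lo + hi + 1) 2 - 1)
        (by have := pv_mid_bounds lo hi hlt; omega)
  else lo
termination_by (hi - lo).toNat
decreasing_by
  · have := pv_mid_bounds lo hi hlt; omega
  · have := pv_mid_bounds lo hi hlt; omega

def generateSquares_alt (n : Int) : List Int :=
  if h : n < 1 then []
  else (PySem.List.pyRange 1 (bsearch n 1 n (by omega) + 1) 1).map (fun i => i * i)

-- ===== PRECONDITION & SPEC =====
def Spec_generateSquares (n : Int) (out : List Int) : Prop := out = generateSquares_alt n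
instance (n : Int) (out : List Int) : Decidable (Spec_generateSquares n out) := by unfold Spec_generateSquares; infer_instance

-- ===== CLAIM (what is proved, stated in full; the proofs are below) =====
def Claim_equal_generateSquares : Prop := ∀ (n : Int), Dom_generateSquares n → Spec_generateSquares n (generateSquares n)

-- ===== LEMMAS AND PROOFS =====

-- binary-search correctness: the result k satisfies k*k ≤ n < (k+1)*(k+1)
theorem bsearch_correct (n lo hi : Int) (h : lo ≤ hi) (hlo : lo * lo ≤ n)
    (hhi : n < (hi + 1) * (hi + 1)) :
    bsearch n lo hi h * bsearch n lo hi h ≤ n ∧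
      n < (bsearch n lo hi h + 1) * (bsearch n lo hi h + 1) ∧ lo ≤ bsearch n lo hi h := by
  unfold bsearch
  split_ifs with hlt hsq
  all_goals try set mid := PySem.Int.floordiv (lo + hi + 1) 2 with hm
  · have hmid : lo < mid ∧ mid ≤ hi := pv_mid_bounds lo hi hlt
    have hr := bsearch_correct n mid hi hmid.2 hsq hhi
    exact ⟨hr.1, hr.2.1, le_trans (le_of_lt hmid.1) hr.2.2⟩
  · have hmid : lo < mid ∧ mid ≤ hi := pv_mid_bounds lo hi hlt
    have hstep : n < (mid - 1 + 1) * (mid - 1 + 1) := by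
      have hmm : mid - 1 + 1 = mid := by omega
      rw [hmm]; omega
    exact bsearch_correct n lo (mid - 1) (by omega) hlo hstep
  · have hlh : lo = hi := by omega
    exact ⟨hlo, by rw [hlh]; exact hhi, le_refl _⟩
termination_by (hi - lo).toNat
decreasing_by all_goals omega

-- A's loop, in square/odd-diff form at index i, equals the squares of range(i, k+1)
theorem goA_eq_range (n i k : Int) (hi : 1 ≤ i) (hik : i ≤ k + 1)
    (hk : k * k ≤ n ∨ k + 1 = i) (hk1 : n < (k + 1) * (k + 1)) :
    goA n (i * i) (2 * i + 1) (by nlinarith) =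
      (PySem.List.pyRange i (k + 1) 1).map (fun j => j * j) := by
  unfold goA
  split_ifs with h
  · have hik' : i ≤ k := by
      by_contra hc
      have hie : i = k + 1 := by omega
      rw [hie] at h
      omega
    rw [PySem.List.pyRange_one_cons (by omega)]
    simp only [List.map_cons]
    congr 1
    have hrec := goA_eq_range n (i + 1) k (by omega) (by omega)
      (Or.inl (by cases hk with | inl hkk => exact hkk | inr hke => omega)) hk1
    convert hrec using 2 <;> ring
  · have hke : k + 1 = i := by
      rcases hk with hkk | hke
      · by_contra hc
        have hik'' : i ≤ k := by omega
        have : i * i ≤ k * k := by nlinarith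
        omega
      · exact hke
    rw [← hke, PySem.List.pyRange_one_eq_nil (by omega)]
    rfl
termination_by (k + 1 - i).toNat
decreasing_by omega

-- ===== VERDICT =====
theorem generateSquares_spec : Claim_equal_generateSquares := by
  intro n _
  unfold Spec_generateSquares generateSquares generateSquares_alt
  split_ifs with hn
  · unfold goA; simp [show ¬ ((1:Int) ≤ n) by omega]
  · have h1 : (1:Int) ≤ n := by omega
    obtain ⟨hks, hk1, hklo⟩ := bsearch_correct n 1 n h1 (by omega) (by nlinarith)
    have := goA_eq_range n 1 (bsearch n 1 n h1) (by omega) (by omega) (Or.inl hks) hk1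
    simpa using this
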